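-- pv_equiv track=rewrite | github.com/tranlv/cloud-computing-specialization | emulated-sdn-application/minidc/placement.py | parityPlacement
-- ===== SOURCE A (Python) =====
-- def parityPlacement(numHosts, numEdgeSwitches):
--     r = range(numHosts)
--     l = []
--     for h in r:
--         if h%2 == 1:
--             l.append(h)
--     for h in r:
--         if h%2 == 0:
--             l.append(h)
--     return l
-- ===== SOURCE B (Python) =====
-- def parityPlacement(numHosts, numEdgeSwitches):
--     return list(range(1, numHosts, 2)) + list(range(0, numHosts, 2))
-- ===== Notes on version B (the rewrite author's own statement) =====
-- stated objective: idiomatic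
-- what changed: Replaces the two filtered full scans of range(numHosts) with direct concatenation of the two strided arithmetic progressions range(1,numHosts,2) and range(0,numHosts,2), eliminating the parity tests entirely.
import Mathlib
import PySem

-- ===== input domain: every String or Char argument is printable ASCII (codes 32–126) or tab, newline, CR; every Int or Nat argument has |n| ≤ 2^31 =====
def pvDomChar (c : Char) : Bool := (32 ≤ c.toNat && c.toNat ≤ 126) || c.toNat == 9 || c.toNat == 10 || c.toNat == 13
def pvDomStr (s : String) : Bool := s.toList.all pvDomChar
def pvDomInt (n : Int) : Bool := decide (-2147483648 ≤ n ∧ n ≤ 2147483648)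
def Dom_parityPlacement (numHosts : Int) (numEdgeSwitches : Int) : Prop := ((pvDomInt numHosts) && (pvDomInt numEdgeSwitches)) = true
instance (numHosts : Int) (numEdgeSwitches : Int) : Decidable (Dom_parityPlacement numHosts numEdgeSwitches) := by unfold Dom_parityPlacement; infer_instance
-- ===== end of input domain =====

-- B lists the odd then the even indices by striding directly over the two arithmetic progressions
-- (range(1,n,2) ++ range(0,n,2)) instead of scanning range(n) twice with a parity filter.

-- ===== PORT A =====
def parityPlacement (numHosts : Int) (numEdgeSwitches : Int) : List Int :=
  let r := PySem.List.pyRange 0 numHosts 1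
  let l : List Int := []
  let l := r.foldl (fun acc h => if PySem.Int.mod h 2 == 1 then acc ++ [h] else acc) l
  let l := r.foldl (fun acc h => if PySem.Int.mod h 2 == 0 then acc ++ [h] else acc) l
  l

-- ===== PORT B =====
def parityPlacement_alt (numHosts : Int) (numEdgeSwitches : Int) : List Int :=
  PySem.List.pyRange 1 numHosts 2 ++ PySem.List.pyRange 0 numHosts 2

-- ===== PRECONDITION & SPEC =====
def Spec_parityPlacement (numHosts : Int) (numEdgeSwitches : Int) (out : List Int) : Prop := out = parityPlacement_alt numHosts numEdgeSwitches
instance (numHosts : Int) (numEdgeSwitches : Int) (out : List Int) : Decidable (Spec_parityPlacement numHosts numEdgeSwitches out) := by unfold Spec_parityPlacement; infer_instance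

-- ===== CLAIM (what is proved, stated in full; the proofs are below) =====
def Claim_equal_parityPlacement : Prop := ∀ (numHosts : Int) (numEdgeSwitches : Int), Dom_parityPlacement numHosts numEdgeSwitches → Spec_parityPlacement numHosts numEdgeSwitches (parityPlacement numHosts numEdgeSwitches)

-- ===== LEMMAS AND PROOFS =====

-- one right-extension step of a step-2 range starting at 0 or 1
lemma pyRange2_succ (m : Nat) (r : Int) (hr : r = 0 ∨ r = 1) :
    PySem.List.pyRange r ((m : Int) + 1) 2 =
      PySem.List.pyRange r (m : Int) 2 ++ (if (m : Int) % 2 = r then [(m : Int)] else []) := by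
  rw [PySem.List.pyRange_of_pos r ((m : Int) + 1) (by norm_num),
      PySem.List.pyRange_of_pos r (m : Int) (by norm_num)]
  by_cases hp : (m : Int) % 2 = r
  · have hc1 : (if r < (m : Int) + 1 then (((m : Int) + 1 - r + 2 - 1) / 2).toNat else 0)
             = (if r < (m : Int) then (((m : Int) - r + 2 - 1) / 2).toNat else 0) + 1 := by
      split_ifs <;> omega
    rw [hc1, List.range_succ, List.map_append, if_pos hp]
    congr 2
    simp only [List.map_cons, List.map_nil, List.cons.injEq, and_true]
    split_ifs <;> omega
  · have hc1 : (if r < (m : Int) + 1 then (((m : Int) + 1 - r + 2 - 1) / 2).toNat else 0)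
             = (if r < (m : Int) then (((m : Int) - r + 2 - 1) / 2).toNat else 0) := by
      split_ifs <;> omega
    rw [hc1, if_neg hp, List.append_nil]

-- the parity filter of range(0,m) is the strided range(r,m,2)
lemma filt_parity (m : Nat) (r : Int) (hr : r = 0 ∨ r = 1) :
    (PySem.List.pyRange 0 (m : Int) 1).filter (fun h => PySem.Int.mod h 2 == r) =
      PySem.List.pyRange r (m : Int) 2 := by
  induction m with
  | zero =>
    rw [PySem.List.pyRange_one_eq_nil (by norm_num)]
    simp only [Nat.cast_zero]
    rw [PySem.List.pyRange_of_pos r 0 (by norm_num)]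
    have : ¬ r < (0 : Int) := by omega
    simp [this]
  | succ k ih =>
    have hcast : (((k + 1 : Nat)) : Int) = (k : Int) + 1 := by push_cast; ring
    rw [hcast, PySem.List.pyRange_one_succ_right (by positivity), List.filter_append, ih,
        pyRange2_succ k r hr, List.append_cancel_left_eq]
    by_cases hp : (k : Int) % 2 = r
    · rw [if_pos hp]
      simp [PySem.Int.mod, Int.fmod_eq_emod, hp]
    · rw [if_neg hp]
      simp only [List.filter_cons, List.filter_nil]
      have : (PySem.Int.mod (k : Int) 2 == r) = false := by
        simp [PySem.Int.mod, Int.fmod_eq_emod]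
        omega
      rw [this]
      simp

-- ===== VERDICT (by name: the statement is the Claim_ definition above) =====
theorem parityPlacement_spec : Claim_equal_parityPlacement := by
  intro n k _
  show parityPlacement n k = parityPlacement_alt n k
  unfold parityPlacement parityPlacement_alt
  simp only [PySem.List.foldl_append_if_eq_filter]
  by_cases h : n ≤ 0
  · rw [PySem.List.pyRange_one_eq_nil h]
    rw [PySem.List.pyRange_of_pos 1 n (by norm_num), PySem.List.pyRange_of_pos 0 n (by norm_num)]
    simp
    omega
  · have hn : n = ((n.toNat : Int)) := by omega
    simp only [List.nil_append]
    rw [hn, filt_parity n.toNat 1 (Or.inr rfl), filt_parity n.toNat 0 (Or.inl rfl)]
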